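-- pv_equiv track=rewrite | github.com/yhcath/CompLing-FInal | sentiment_analysis.py | build_bigram2_features
-- ===== SOURCE A (Python) =====
-- def build_bigram2_features(token_list_list, feature_list):
--     result = []
--
--     for token_list in token_list_list:
--         feature_row = [0]*len(feature_list)
--         for i in range(len(token_list) - 1):
--             token_one = token_list[i]
--             token_two = token_list[i + 1]
--             bigram = f"{token_one} {token_two}"
--
--             if bigram not in feature_list:
--                 # Shouldn't happen for the training set, but might happen for the testing set
--                 continue
--             else:
--                 feature_row[feature_list.index(bigram)] += 1
--
--         result.append(feature_row)
--
--     return result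
-- ===== SOURCE B (Python) =====
-- def build_bigram2_features(token_list_list, feature_list):
--     result = []
--     for tokens in token_list_list:
--         counts = {}
--         for a, b in zip(tokens, tokens[1:]):
--             bigram = a + " " + b
--             counts[bigram] = counts.get(bigram, 0) + 1
--         result.append([counts.get(f, 0) for f in feature_list])
--     return result
-- ===== Notes on version B (the rewrite author's own statement) =====
-- stated objective: faster
-- what changed: B counts all bigrams of each token list in one dict pass and then emits the row as a direct lookup per feature, removing A's inner membership test and list.index scan per position; Pre_ excludes only inputs where a duplicated feature-list entry occurs as a bigram of some token list, where A's list.index puts the whole count on the first occurrence only while B naturally repeats it at each occurrence.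
-- outside the precondition, e.g. on build_bigram2_features([['a', 'b']], ['a b', 'a b']): A returns [[1, 0]], B returns [[1, 1]]
import Mathlib
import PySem

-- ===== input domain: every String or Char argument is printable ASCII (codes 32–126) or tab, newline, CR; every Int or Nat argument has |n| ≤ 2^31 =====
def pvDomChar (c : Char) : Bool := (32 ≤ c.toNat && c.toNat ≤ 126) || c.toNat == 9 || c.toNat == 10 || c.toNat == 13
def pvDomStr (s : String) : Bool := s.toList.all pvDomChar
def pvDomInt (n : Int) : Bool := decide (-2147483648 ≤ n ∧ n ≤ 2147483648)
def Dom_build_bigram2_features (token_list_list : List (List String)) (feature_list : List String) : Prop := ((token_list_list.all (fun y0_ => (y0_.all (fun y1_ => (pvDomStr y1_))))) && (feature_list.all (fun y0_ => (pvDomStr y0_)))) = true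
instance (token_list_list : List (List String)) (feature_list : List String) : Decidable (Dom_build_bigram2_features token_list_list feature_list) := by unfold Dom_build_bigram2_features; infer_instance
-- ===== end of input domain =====

-- B counts each token list's bigrams in one dict pass and emits the row by direct lookup
-- per feature (measured faster); Pre_ excludes inputs where a duplicated feature-list entry
-- occurs as a bigram, where A's first-slot-only counting and B's per-slot lookup both differ
-- defensibly.


-- ===== PORT A =====
-- inner loop of A: for i in range(len(token_list)-1): ... (indices are always in range,
-- so token_list[i] is ported with pyGetD; the default is never read)
def pvRowA (token_list : List String) (feature_list : List String) : List Int :=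
  (PySem.List.pyRange 0 ((token_list.length : Int) - 1) 1).foldl
    (fun feature_row i =>
      let token_one := PySem.List.pyGetD token_list i ""
      let token_two := PySem.List.pyGetD token_list (i + 1) ""
      let bigram := token_one ++ " " ++ token_two
      match PySem.List.index? feature_list bigram with
      | none => feature_row               -- 'if bigram not in feature_list: continue'
      | some j => feature_row.set j (PySem.List.pyGetD feature_row (j : Int) 0 + 1))
    (List.replicate feature_list.length 0)

def build_bigram2_features (token_list_list : List (List String)) (feature_list : List String) : List (List Int) :=
  token_list_list.foldl (fun result token_list => result ++ [pvRowA token_list feature_list]) []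

-- ===== PORT B =====
def pvRowB (token_list : List String) (feature_list : List String) : List Int :=
  let counts := (token_list.zip (PySem.List.slice token_list (some 1) none)).foldl
      (fun counts ab =>
        let bigram := ab.1 ++ " " ++ ab.2
        counts.insert bigram (counts.getD bigram 0 + 1))
      (PySem.Dict.empty)
  feature_list.map (fun f => counts.getD f 0)

def build_bigram2_features_alt (token_list_list : List (List String)) (feature_list : List String) : List (List Int) :=
  token_list_list.foldl (fun result token_list => result ++ [pvRowB token_list feature_list]) []

-- ===== PRECONDITION & SPEC =====
-- the bigrams of a token list, as data the precondition inspects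
def pvBigrams (tl : List String) : List String :=
  (tl.zip tl.tail).map (fun p => p.1 ++ " " ++ p.2)

-- Pre_ excludes inputs where a DUPLICATED feature-list entry occurs as a bigram of some
-- token list: there A's list.index puts the whole count on the first occurrence only and
-- later occurrences stay 0, an accidental first-vs-every-occurrence corner on which B's
-- per-slot lookup (the count at every occurrence) is equally defensible.
def Pre_build_bigram2_features (token_list_list : List (List String)) (feature_list : List String) : Prop :=
  ∀ f ∈ feature_list, 1 < feature_list.count f → ∀ tl ∈ token_list_list, f ∉ pvBigrams tl
instance (token_list_list : List (List String)) (feature_list : List String) : Decidable (Pre_build_bigram2_features token_list_list feature_list) := by unfold Pre_build_bigram2_features; infer_instance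

def pvWitness_build_bigram2_features : List (List String) × List String :=
  ([["a", "b"], ["b", "a", "b"]], ["a b", "b a"])

def Spec_build_bigram2_features (token_list_list : List (List String)) (feature_list : List String) (out : List (List Int)) : Prop := out = build_bigram2_features_alt token_list_list feature_list
instance (token_list_list : List (List String)) (feature_list : List String) (out : List (List Int)) : Decidable (Spec_build_bigram2_features token_list_list feature_list out) := by unfold Spec_build_bigram2_features; infer_instance

-- ===== CLAIM (what is proved, stated in full; the proofs are below) =====
def Claim_equal_build_bigram2_features : Prop := ∀ (token_list_list : List (List String)) (feature_list : List String), Dom_build_bigram2_features token_list_list feature_list → Pre_build_bigram2_features token_list_list feature_list → Spec_build_bigram2_features token_list_list feature_list (build_bigram2_features token_list_list feature_list)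

-- ===== LEMMAS AND PROOFS =====

-- index? bounds: a successful index is < length and points at its value
theorem pv_index?_lt {α : Type} [DecidableEq α] {xs : List α} {v : α} {k : Nat}
    (h : PySem.List.index? xs v = some k) : k < xs.length := by
  rcases (PySem.List.index?_eq_some_iff xs v k).1 h with ⟨pre, suf, hxs, hlen, -⟩
  subst hxs; simp [← hlen]

theorem pv_index?_get {α : Type} [DecidableEq α] {xs : List α} {v : α} {k : Nat}
    (h : PySem.List.index? xs v = some k) (hk : k < xs.length) : xs[k] = v := by
  rcases (PySem.List.index?_eq_some_iff xs v k).1 h with ⟨pre, suf, hxs, hlen, -⟩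
  subst hxs hlen; simp

-- A's inner-loop step, written on the bigram value
def pvStep (feature_list : List String) (feature_row : List Int) (bigram : String) : List Int :=
  match PySem.List.index? feature_list bigram with
  | none => feature_row
  | some j => feature_row.set j (PySem.List.pyGetD feature_row (j : Int) 0 + 1)

theorem pvStep_length (fl : List String) (row : List Int) (b : String) :
    (pvStep fl row b).length = row.length := by
  unfold pvStep; cases PySem.List.index? fl b <;> simp

-- invariant of A's inner loop: slot j accumulates the count of bigrams whose first index is j
theorem pv_foldl_step_getElem (fl : List String) (bs : List String) (row : List Int)
    (hlen : row.length = fl.length) (j : Nat) (hj : j < (bs.foldl (pvStep fl) row).length)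
    (hj' : j < row.length) :
    (bs.foldl (pvStep fl) row)[j] =
      row[j] + (bs.countP (fun b => PySem.List.index? fl b = some j) : Int) := by
  induction bs generalizing row with
  | nil => simp
  | cons b bs ih =>
    have hsl : (pvStep fl row b).length = row.length := pvStep_length fl row b
    have hj2 : j < (pvStep fl row b).length := by omega
    have := ih (pvStep fl row b) (by omega) (by simpa [List.foldl_cons] using hj) hj2
    simp only [List.foldl_cons]
    refine this.trans ?_
    have hstep : (pvStep fl row b)[j]'hj2 =
        row[j] + (if PySem.List.index? fl b = some j then (1 : Int) else 0) := by
      rcases hidx : PySem.List.index? fl b with _ | k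
      · simp only [pvStep, hidx]
        simp
      · have hk : k < fl.length := pv_index?_lt hidx
        have hk' : k < row.length := by omega
        simp only [pvStep, hidx]
        simp only [show PySem.List.pyGetD row (↑k) 0 = row[k] from by
          rw [PySem.List.pyGetD_natCast, List.getD_eq_getElem _ _ hk'], List.getElem_set]
        by_cases hkj : k = j <;> simp [hkj]
    rw [hstep, List.countP_cons]
    push_cast
    simp only [decide_eq_true_eq]
    ring

theorem pv_foldl_step_length (fl : List String) (bs : List String) (row : List Int) :
    (bs.foldl (pvStep fl) row).length = row.length := by
  induction bs generalizing row with
  | nil => rfl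
  | cons b bs ih => rw [List.foldl_cons, ih, pvStep_length]

-- A's index fold over range(len-1) is the fold of pvStep over the zip-built bigram list
theorem pv_bigrams_eq (tl : List String) :
    (PySem.List.pyRange 0 ((tl.length : Int) - 1) 1).map
      (fun i => PySem.List.pyGetD tl i "" ++ " " ++ PySem.List.pyGetD tl (i + 1) "") =
    (tl.zip (PySem.List.slice tl (some 1) none)).map (fun p => p.1 ++ " " ++ p.2) := by
  rw [PySem.List.slice_from_one]
  apply List.ext_getElem
  · simp [PySem.List.length_pyRange_one]
  · intro k h1 h2
    have hk : k < tl.length - 1 := by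
      simpa [PySem.List.length_pyRange_one] using h1
    simp only [List.getElem_map, PySem.List.getElem_pyRange_one, List.getElem_zip]
    have h0 : (0 : Int) + k = (k : Int) := by ring
    rw [h0, PySem.List.pyGetD_natCast, List.getD_eq_getElem _ _ (by omega)]
    have : (k : Int) + 1 = ((k + 1 : Nat) : Int) := by push_cast; ring
    rw [this, PySem.List.pyGetD_natCast, List.getD_eq_getElem _ _ (by omega)]
    simp [List.getElem_tail]

-- under Pre_'s per-row condition, the bigrams whose first feature index is j are exactly
-- the occurrences of fl[j]
theorem pv_countP_eq_count (fl : List String) (bs : List String)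
    (hnb : ∀ f ∈ fl, 1 < fl.count f → f ∉ bs) (j : Nat) (hj : j < fl.length) :
    bs.countP (fun b => PySem.List.index? fl b = some j) = bs.count fl[j] := by
  rcases hdx : PySem.List.index? fl fl[j] with _ | k
  · exact absurd (List.getElem_mem hj) ((PySem.List.index?_eq_none_iff fl fl[j]).1 hdx)
  · by_cases hkj : k = j
    · subst hkj
      rw [List.count_eq_countP]
      apply List.countP_congr
      intro b _
      simp only [decide_eq_true_eq, beq_iff_eq]
      constructor
      · intro hb; exact (pv_index?_get hb (pv_index?_lt hb)).symm
      · intro hb; subst hb; exact hdx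
    · obtain ⟨hk, hkv, hfirst⟩ := PySem.List.getElem_of_index?_eq_some hdx
      have hklt : k < j := by
        rcases Nat.lt_or_ge j k with h | h
        · exact absurd rfl (hfirst j h)
        · omega
      have hmem1 : fl[j] ∈ fl.take (k + 1) := by
        have hlen : k < (fl.take (k + 1)).length := by simp [List.length_take]; omega
        have : (fl.take (k + 1))[k]'hlen = fl[k] := List.getElem_take
        rw [← hkv, ← this]; exact List.getElem_mem hlen
      have hmem2 : fl[j] ∈ fl.drop (k + 1) := by
        have hlen : j - (k + 1) < (fl.drop (k + 1)).length := by simp [List.length_drop]; omega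
        have : (fl.drop (k + 1))[j - (k + 1)]'hlen = fl[(k + 1) + (j - (k + 1))]'(by omega) :=
          List.getElem_drop
        have hidx : (k + 1) + (j - (k + 1)) = j := by omega
        refine (by simpa only [hidx] using this : (fl.drop (k + 1))[j - (k + 1)]'hlen = fl[j]) ▸
          List.getElem_mem hlen
      have hdup : 1 < fl.count fl[j] := by
        obtain ⟨v, hv⟩ : ∃ v, fl[j] = v := ⟨fl[j], rfl⟩
        rw [hv] at hmem1 hmem2 ⊢
        have hsplit : fl.count v = (fl.take (k + 1)).count v + (fl.drop (k + 1)).count v := by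
          conv_lhs => rw [← List.take_append_drop (k + 1) fl]
          exact List.count_append ..
        have h1 := List.count_pos_iff.2 hmem1
        have h2 := List.count_pos_iff.2 hmem2
        omega
      have hnmem : fl[j] ∉ bs := hnb fl[j] (List.getElem_mem hj) hdup
      rw [List.count_eq_zero.2 hnmem, List.countP_eq_zero.2]
      intro b hb hcon
      simp only [decide_eq_true_eq] at hcon
      have : fl[j] = b := pv_index?_get hcon (pv_index?_lt hcon)
      exact absurd (this ▸ hcon) (by rw [hdx]; simp [hkj])

-- the per-row equality when no duplicated feature occurs as a bigram of this token list
theorem pvRow_eq (tl fl : List String)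
    (hnb : ∀ f ∈ fl, 1 < fl.count f → f ∉ pvBigrams tl) : pvRowA tl fl = pvRowB tl fl := by
  set bs := (tl.zip (PySem.List.slice tl (some 1) none)).map (fun p => p.1 ++ " " ++ p.2) with hbs
  set C := bs.foldl (fun d x => d.insert x (d.getD x 0 + 1)) (PySem.Dict.empty : PySem.Dict String Int) with hC
  have hA : pvRowA tl fl = bs.foldl (pvStep fl) (List.replicate fl.length (0:Int)) := by
    unfold pvRowA
    have hfold :
        (PySem.List.pyRange 0 ((tl.length : Int) - 1) 1).foldl
          (fun feature_row i =>
            let token_one := PySem.List.pyGetD tl i ""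
            let token_two := PySem.List.pyGetD tl (i + 1) ""
            let bigram := token_one ++ " " ++ token_two
            match PySem.List.index? fl bigram with
            | none => feature_row
            | some j => feature_row.set j (PySem.List.pyGetD feature_row (j : Int) 0 + 1))
          (List.replicate fl.length (0:Int))
        = (((PySem.List.pyRange 0 ((tl.length : Int) - 1) 1).map
            (fun i => PySem.List.pyGetD tl i "" ++ " " ++ PySem.List.pyGetD tl (i + 1) "")).foldl
            (pvStep fl) (List.replicate fl.length (0:Int))) := by
      rw [List.foldl_map]; rfl
    rw [hfold, pv_bigrams_eq]
  have hB : pvRowB tl fl = fl.map (fun f => C.getD f 0) := by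
    unfold pvRowB
    rw [show (tl.zip (PySem.List.slice tl (some 1) none)).foldl
        (fun (counts : PySem.Dict String Int) ab =>
          let bigram := ab.1 ++ " " ++ ab.2
          counts.insert bigram (counts.getD bigram 0 + 1)) PySem.Dict.empty = C from by
      rw [hC, hbs, List.foldl_map]]
  have hgetD : ∀ v, C.getD v 0 = (bs.count v : Int) := by
    intro v
    rw [hC, PySem.Dict.getD_foldl_insert_add_one, PySem.Dict.getD_empty]
    simp
  rw [hA, hB]
  apply List.ext_getElem
  · rw [pv_foldl_step_length]; simp
  · intro j h1 h2
    have hjf : j < fl.length := by simpa using h2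
    rw [pv_foldl_step_getElem fl bs _ (by simp) j h1 (by simpa using hjf)]
    rw [List.getElem_map]
    have hbs' : bs = pvBigrams tl := by rw [hbs, pvBigrams, PySem.List.slice_from_one]
    have hcnt : bs.countP (fun b => PySem.List.index? fl b = some j) = bs.count fl[j] :=
      pv_countP_eq_count fl bs (fun f hf hc => hbs' ▸ hnb f hf hc) j hjf
    rw [List.getElem_replicate, hcnt, hgetD]
    simp

-- ===== VERDICT (by name: the statement is the Claim_ definition above) =====
theorem build_bigram2_features_spec : Claim_equal_build_bigram2_features := by
  intro tll fl _ hpre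
  unfold Spec_build_bigram2_features build_bigram2_features build_bigram2_features_alt
  rw [PySem.List.foldl_append_singleton_eq_map, PySem.List.foldl_append_singleton_eq_map]
  simp only [List.nil_append]
  exact List.map_congr_left fun tl htl =>
    pvRow_eq tl fl (fun f hf hc => hpre f hf hc tl htl)
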